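-- pv_equiv track=rewrite | github.com/ralapiii24/Tools | v12/TASK/ACLDupCheckTask.py | _smart_connected_components
-- ===== SOURCE A (Python) =====
-- from typing import Dict, Iterable, List, Optional, Set, Tuple
--
-- def _smart_connected_components(NODES: Iterable[int], UNDIRECTED_EDGES: List[Tuple[int, int]], DIRECTED_EDGES: List[Tuple[int, int]]) -> List[Set[int]]:
--     if not UNDIRECTED_EDGES:
--         return []
--
--     # 统计每个节点的入度（被多少个规则覆盖）
--     INDEGREE = {}
--     for NODE in NODES:
--         INDEGREE[NODE] = 0
--
--     for FROM_NODE, TO_NODE in DIRECTED_EDGES: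
--         if TO_NODE in INDEGREE:
--             INDEGREE[TO_NODE] += 1
--
--     # 找出被多个规则覆盖的节点（入度 > 1）
--     MULTI_COVERED_NODES = {NODE for NODE, DEGREE in INDEGREE.items() if DEGREE > 1}
--
--     # 为被多个规则覆盖的节点找到最靠前的覆盖者
--     NODE_TO_GROUP = {}
--     for NODE in MULTI_COVERED_NODES:
--         # 找到所有覆盖这个节点的规则
--         COVERERS = []
--         for FROM_NODE, TO_NODE in DIRECTED_EDGES:
--             if TO_NODE == NODE:
--                 COVERERS.append(FROM_NODE)
--         # 选择行号最小的覆盖者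
--         if COVERERS:
--             NODE_TO_GROUP[NODE] = min(COVERERS)
--
--     # 构建邻接表，将被多个规则覆盖的节点连接到最靠前的覆盖者
--     GRAPH: Dict[int, Set[int]] = {NODE: set() for NODE in NODES}
--     for NODE_U, NODE_V in UNDIRECTED_EDGES:
--         # 如果节点V被多个规则覆盖，连接到其最靠前的覆盖者
--         if NODE_V in MULTI_COVERED_NODES and NODE_V in NODE_TO_GROUP:
--             TARGET_GROUP = NODE_TO_GROUP[NODE_V]
--             if NODE_U == TARGET_GROUP:
--                 GRAPH.setdefault(NODE_U, set()).add(NODE_V)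
--                 GRAPH.setdefault(NODE_V, set()).add(NODE_U)
--         # 如果节点U被多个规则覆盖，连接到其最靠前的覆盖者
--         elif NODE_U in MULTI_COVERED_NODES and NODE_U in NODE_TO_GROUP:
--             TARGET_GROUP = NODE_TO_GROUP[NODE_U]
--             if NODE_V == TARGET_GROUP:
--                 GRAPH.setdefault(NODE_U, set()).add(NODE_V)
--                 GRAPH.setdefault(NODE_V, set()).add(NODE_U)
--         # 正常连接
--         else:
--             GRAPH.setdefault(NODE_U, set()).add(NODE_V)
--             GRAPH.setdefault(NODE_V, set()).add(NODE_U)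
--
--     VISITED_NODES: Set[int] = set()
--     COMPONENTS: List[Set[int]] = []
--
--     for NODE in NODES:
--         if NODE in VISITED_NODES:
--             continue
--
--         # 使用BFS找到所有连接的节点
--         QUEUE = [NODE]
--         COMPONENT = set()
--
--         while QUEUE:
--             CURRENT_NODE = QUEUE.pop(0)
--             if CURRENT_NODE in VISITED_NODES:
--                 continue
--             VISITED_NODES.add(CURRENT_NODE)
--             COMPONENT.add(CURRENT_NODE)
--
--             # 添加相邻的节点
--             for NEIGHBOR in GRAPH.get(CURRENT_NODE, []):
--                 if NEIGHBOR not in VISITED_NODES: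
--                     QUEUE.append(NEIGHBOR)
--
--         if COMPONENT:
--             COMPONENTS.append(COMPONENT)
--
--     return COMPONENTS
-- ===== SOURCE B (Python) =====
-- from collections import deque
-- from typing import Dict, Iterable, List, Set, Tuple
--
-- def _smart_connected_components(NODES: Iterable[int], UNDIRECTED_EDGES: List[Tuple[int, int]], DIRECTED_EDGES: List[Tuple[int, int]]) -> List[Set[int]]:
--     if not UNDIRECTED_EDGES:
--         return []
--
--     # one pass over DIRECTED_EDGES: in-degree and the smallest coverer per node
--     indegree = {node: 0 for node in NODES}
--     best_coverer: Dict[int, int] = {}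
--     for from_node, to_node in DIRECTED_EDGES:
--         if to_node in indegree:
--             indegree[to_node] += 1
--             if to_node not in best_coverer or from_node < best_coverer[to_node]:
--                 best_coverer[to_node] = from_node
--
--     multi = {node for node, degree in indegree.items() if degree > 1}
--
--     graph: Dict[int, Set[int]] = {node: set() for node in NODES}
--
--     def link(a: int, b: int) -> None:
--         graph.setdefault(a, set()).add(b)
--         graph.setdefault(b, set()).add(a)
--
--     for u, v in UNDIRECTED_EDGES:
--         if v in multi:
--             if u == best_coverer[v]:
--                 link(u, v)
--         elif u in multi:
--             if v == best_coverer[u]: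
--                 link(u, v)
--         else:
--             link(u, v)
--
--     visited: Set[int] = set()
--     components: List[Set[int]] = []
--     for start in NODES:
--         if start in visited:
--             continue
--         visited.add(start)
--         component = {start}
--         queue = deque([start])
--         while queue:
--             current = queue.popleft()
--             for neighbor in graph.get(current, ()):
--                 if neighbor not in visited:
--                     visited.add(neighbor)
--                     component.add(neighbor)
--                     queue.append(neighbor)
--         components.append(component)
--     return components
-- ===== Notes on version B (the rewrite author's own statement) =====
-- stated objective: alternative
-- what changed: B computes each multi-covered node's minimum coverer in a single pass over DIRECTED_EDGES (A rescans all of DIRECTED_EDGES for every multi-covered node) and runs BFS with a deque that marks nodes visited at enqueue time (A uses list.pop(0), enqueues duplicates and checks visited at pop time).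
import Mathlib
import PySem

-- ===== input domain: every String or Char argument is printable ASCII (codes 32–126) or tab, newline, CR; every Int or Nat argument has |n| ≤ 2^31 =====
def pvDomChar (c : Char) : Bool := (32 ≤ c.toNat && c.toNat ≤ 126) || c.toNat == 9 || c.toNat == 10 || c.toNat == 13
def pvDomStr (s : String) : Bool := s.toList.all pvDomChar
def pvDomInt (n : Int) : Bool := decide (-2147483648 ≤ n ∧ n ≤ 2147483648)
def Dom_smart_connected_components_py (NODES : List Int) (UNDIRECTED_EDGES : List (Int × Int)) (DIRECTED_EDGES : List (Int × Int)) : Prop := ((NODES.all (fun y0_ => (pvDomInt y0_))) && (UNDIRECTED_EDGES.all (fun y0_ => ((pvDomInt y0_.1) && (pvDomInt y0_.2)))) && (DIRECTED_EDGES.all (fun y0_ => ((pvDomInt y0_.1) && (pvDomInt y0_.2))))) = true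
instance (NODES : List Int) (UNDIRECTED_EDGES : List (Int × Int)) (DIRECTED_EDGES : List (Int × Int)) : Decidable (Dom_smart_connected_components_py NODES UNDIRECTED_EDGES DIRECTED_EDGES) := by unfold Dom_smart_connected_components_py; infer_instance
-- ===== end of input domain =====

-- B re-implements A with a one-pass minimum-coverer dict (instead of a rescan of DIRECTED_EDGES per
-- multi-covered node) and a BFS that marks nodes visited at enqueue time (deque, no duplicate enqueues);
-- the return value is proved identical on every input.

-- GRAPH.setdefault(a, set()).add(b); GRAPH.setdefault(b, set()).add(a)  (both Pythons contain these two lines)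
def pvLink (g : PySem.Dict Int (PySem.Set Int)) (u v : Int) : PySem.Dict Int (PySem.Set Int) :=
  let g1 := g.insert u (PySem.Set.add (g.getD u PySem.Set.empty) v)
  g1.insert v (PySem.Set.add (g1.getD v PySem.Set.empty) u)

-- {NODE for NODE, DEGREE in INDEGREE.items() if DEGREE > 1}  (identical comprehension in both Pythons)
def pvMulti (indeg : PySem.Dict Int Int) : PySem.Set Int :=
  PySem.Set.ofList (((indeg.items.filter (fun p => 1 < p.2)).map (fun p => p.1)))

-- {NODE: set() for NODE in NODES}  (identical comprehension in both Pythons)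
def pvGraphInit (NODES : List Int) : PySem.Dict Int (PySem.Set Int) :=
  NODES.foldl (fun g n => g.insert n PySem.Set.empty) PySem.Dict.empty

-- termination measure for the BFS while-loops: nodes of the graph universe not yet visited, then queue length
def pvUniv (g : PySem.Dict Int (PySem.Set Int)) (q : List Int) : List Int :=
  g.keys ++ g.values.flatten ++ q

def pvMeas (g : PySem.Dict Int (PySem.Set Int)) (q : List Int) (vis : PySem.Set Int) : Nat :=
  ((PySem.Set.ofList (pvUniv g q)).filter (fun x => !PySem.Set.contains vis x)).length

lemma pv_contains_add (s : PySem.Set Int) (x y : Int) :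
    PySem.Set.contains (PySem.Set.add s x) y = (PySem.Set.contains s y || y == x) := by
  by_cases h : y ∈ PySem.Set.add s x
  · rw [(PySem.Set.contains_iff _ _).2 h]
    rcases (PySem.Set.mem_add s x y).1 h with h' | h'
    · rw [(PySem.Set.contains_iff _ _).2 h']; rfl
    · subst h'; simp
  · have h1 : PySem.Set.contains (PySem.Set.add s x) y = false := by
      cases hc : PySem.Set.contains (PySem.Set.add s x) y
      · rfl
      · exact absurd ((PySem.Set.contains_iff _ _).1 hc) h
    have h2 : y ∉ s := fun hy => h ((PySem.Set.mem_add s x y).2 (Or.inl hy))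
    have h3 : y ≠ x := fun hy => h ((PySem.Set.mem_add s x y).2 (Or.inr hy))
    have h4 : PySem.Set.contains s y = false := by
      cases hc : PySem.Set.contains s y
      · rfl
      · exact absurd ((PySem.Set.contains_iff _ _).1 hc) h2
    simp [h3]

lemma pv_mem_update (s : PySem.Set Int) (l : List Int) (y : Int) :
    y ∈ PySem.Set.update s l ↔ y ∈ s ∨ y ∈ l := by
  rw [PySem.Set.update_eq_append_filter]
  simp only [List.mem_append, List.mem_filter, PySem.Set.mem_ofList]
  constructor
  · rintro (h | ⟨h, _⟩)
    · exact Or.inl h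
    · exact Or.inr h
  · rintro (h | h)
    · exact Or.inl h
    · by_cases hs : y ∈ s
      · exact Or.inl hs
      · refine Or.inr ⟨h, ?_⟩
        cases hc : PySem.Set.contains s y
        · rfl
        · exact absurd ((PySem.Set.contains_iff _ _).1 hc) hs

lemma pv_not_contains (s : PySem.Set Int) (y : Int) (h : y ∉ s) : PySem.Set.contains s y = false := by
  cases hc : PySem.Set.contains s y
  · rfl
  · exact absurd ((PySem.Set.contains_iff _ _).1 hc) h

lemma pv_not_mem (s : PySem.Set Int) (y : Int) (h : PySem.Set.contains s y = false) : y ∉ s := by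
  intro hy
  rw [(PySem.Set.contains_iff _ _).2 hy] at h
  cases h

-- strict decrease: a new node n (outside vis, inside the graph part of the universe) becomes visited
lemma pv_meas_lt (g : PySem.Dict Int (PySem.Set Int)) (c : Int) (rest ext : List Int)
    (vis vis' : PySem.Set Int) (n : Int)
    (hext : ∀ x ∈ ext, x ∈ g.values.flatten)
    (hn : n ∈ g.values.flatten ∨ n = c)
    (hnv : PySem.Set.contains vis n = false)
    (hvis' : ∀ x, PySem.Set.contains vis' x = false → PySem.Set.contains vis x = false ∧ x ≠ n) :
    pvMeas g (rest ++ ext) vis' < pvMeas g (c :: rest) vis := by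
  unfold pvMeas
  set L₁ := (PySem.Set.ofList (pvUniv g (c :: rest))).filter (fun x => !PySem.Set.contains vis x) with hL₁
  set L₂ := (PySem.Set.ofList (pvUniv g (rest ++ ext))).filter (fun x => !PySem.Set.contains vis' x) with hL₂
  have hnd₁ : L₁.Nodup := (PySem.Set.nodup_ofList _).filter _
  have hnd₂ : L₂.Nodup := (PySem.Set.nodup_ofList _).filter _
  have hcin : n ∈ L₁ := by
    rw [hL₁, List.mem_filter, PySem.Set.mem_ofList]
    refine ⟨?_, by simp [pv_not_mem _ _ hnv]⟩
    unfold pvUniv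
    rcases hn with h | h
    · simp [h]
    · subst h; simp
  have hsub : ∀ x ∈ L₂, x ∈ L₁.erase n := by
    intro x hx
    rw [hL₂, List.mem_filter, PySem.Set.mem_ofList] at hx
    obtain ⟨hxu, hxv⟩ := hx
    have hxv' : PySem.Set.contains vis' x = false := by
      cases hc : PySem.Set.contains vis' x
      · rfl
      · rw [hc] at hxv; exact absurd hxv (by simp)
    obtain ⟨hxvis, hxn⟩ := hvis' x hxv'
    have hxL₁ : x ∈ L₁ := by
      rw [hL₁, List.mem_filter, PySem.Set.mem_ofList]
      refine ⟨?_, by simp [pv_not_mem _ _ hxvis]⟩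
      unfold pvUniv at hxu ⊢
      simp only [List.mem_append] at hxu ⊢
      rcases hxu with (h | h) | h
      · exact Or.inl (Or.inl h)
      · exact Or.inl (Or.inr h)
      · rcases h with h' | h'
        · exact Or.inr (List.mem_cons_of_mem _ h')
        · exact Or.inl (Or.inr (hext x h'))
    exact (List.mem_erase_of_ne hxn).2 hxL₁
  have hle : L₂.length ≤ (L₁.erase n).length :=
    (hnd₂.subperm hsub).length_le
  have herase : (L₁.erase n).length = L₁.length - 1 := List.length_erase_of_mem hcin
  have hpos : 0 < L₁.length := List.length_pos_of_mem hcin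
  omega

-- weak decrease: dropping the popped head, visited unchanged or grown
lemma pv_meas_le (g : PySem.Dict Int (PySem.Set Int)) (c : Int) (rest ext : List Int)
    (vis vis' : PySem.Set Int)
    (hext : ∀ x ∈ ext, x ∈ g.values.flatten)
    (hvis' : ∀ x, PySem.Set.contains vis' x = false → PySem.Set.contains vis x = false) :
    pvMeas g (rest ++ ext) vis' ≤ pvMeas g (c :: rest) vis := by
  unfold pvMeas
  refine List.Subperm.length_le (List.Nodup.subperm ((PySem.Set.nodup_ofList _).filter _) ?_)
  intro x hx
  rw [List.mem_filter, PySem.Set.mem_ofList] at hx ⊢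
  obtain ⟨hxu, hxv⟩ := hx
  have hxv' : PySem.Set.contains vis' x = false := by
    cases hc : PySem.Set.contains vis' x
    · rfl
    · rw [hc] at hxv; exact absurd hxv (by simp)
  refine ⟨?_, by simp [pv_not_mem _ _ (hvis' x hxv')]⟩
  unfold pvUniv at hxu ⊢
  simp only [List.mem_append] at hxu ⊢
  rcases hxu with (h | h) | h
  · exact Or.inl (Or.inl h)
  · exact Or.inl (Or.inr h)
  · rcases h with h' | h'
    · exact Or.inr (List.mem_cons_of_mem _ h')
    · exact Or.inl (Or.inr (hext x h'))

lemma pv_getD_sub (g : PySem.Dict Int (PySem.Set Int)) (c : Int) :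
    ∀ x ∈ PySem.Dict.getD g c PySem.Set.empty, x ∈ g.values.flatten := by
  intro x hx
  cases hq : PySem.Dict.get? g c with
  | none => rw [PySem.Dict.getD_of_get?_eq_none _ _ hq] at hx; cases hx
  | some s =>
    rw [PySem.Dict.getD_of_get?_eq_some _ _ hq] at hx
    have : s ∈ g.values := by
      have := PySem.Dict.mem_items_of_get?_eq_some g hq
      exact List.mem_map.2 ⟨(c, s), this, rfl⟩
    exact List.mem_flatten.2 ⟨s, this, hx⟩

-- ===== PORT A =====
-- INDEGREE = {}; for NODE in NODES: INDEGREE[NODE] = 0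
-- for FROM_NODE, TO_NODE in DIRECTED_EDGES: if TO_NODE in INDEGREE: INDEGREE[TO_NODE] += 1
def pvA_indeg (NODES : List Int) (DIRECTED_EDGES : List (Int × Int)) : PySem.Dict Int Int :=
  DIRECTED_EDGES.foldl
    (fun d e => if d.contains e.2 then d.modify e.2 0 (· + 1) else d)
    (NODES.foldl (fun d n => d.insert n (0 : Int)) PySem.Dict.empty)

-- COVERERS = []; for FROM_NODE, TO_NODE in DIRECTED_EDGES: if TO_NODE == NODE: COVERERS.append(FROM_NODE)
def pvA_coverers (DIRECTED_EDGES : List (Int × Int)) (node : Int) : List Int :=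
  DIRECTED_EDGES.foldl (fun acc e => if e.2 = node then acc ++ [e.1] else acc) []

-- NODE_TO_GROUP = {}; for NODE in MULTI: ... if COVERERS: NODE_TO_GROUP[NODE] = min(COVERERS)
def pvA_group (DIRECTED_EDGES : List (Int × Int)) (multi : PySem.Set Int) : PySem.Dict Int Int :=
  multi.foldl
    (fun d n =>
      match PySem.List.min? (pvA_coverers DIRECTED_EDGES n) (fun y => y) with
      | some m => d.insert n m
      | none => d)
    PySem.Dict.empty

-- the UNDIRECTED_EDGES loop building GRAPH (A checks membership in NODE_TO_GROUP explicitly)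
def pvA_graph (NODES : List Int) (UNDIRECTED_EDGES : List (Int × Int))
    (multi : PySem.Set Int) (group : PySem.Dict Int Int) : PySem.Dict Int (PySem.Set Int) :=
  UNDIRECTED_EDGES.foldl
    (fun g e =>
      if PySem.Set.contains multi e.2 && group.contains e.2 then
        if e.1 = group.getD e.2 0 then pvLink g e.1 e.2 else g
      else if PySem.Set.contains multi e.1 && group.contains e.1 then
        if e.2 = group.getD e.1 0 then pvLink g e.1 e.2 else g
      else pvLink g e.1 e.2)
    (pvGraphInit NODES)

-- while QUEUE: CURRENT = QUEUE.pop(0); skip if visited; else visit and append unvisited neighbours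
def pvA_bfs (g : PySem.Dict Int (PySem.Set Int)) (q : List Int) (vis comp : PySem.Set Int) :
    PySem.Set Int × PySem.Set Int :=
  match q with
  | [] => (vis, comp)
  | c :: rest =>
    if PySem.Set.contains vis c then pvA_bfs g rest vis comp
    else
      pvA_bfs g
        (rest ++ (PySem.Dict.getD g c PySem.Set.empty).filter
          (fun n => !PySem.Set.contains (PySem.Set.add vis c) n))
        (PySem.Set.add vis c) (PySem.Set.add comp c)
termination_by (pvMeas g q vis, q.length)
decreasing_by
  · have h := pv_meas_le g c rest [] vis vis (by intro x hx; cases hx) (fun _ h => h)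
    simp only [List.append_nil] at h
    rcases lt_or_eq_of_le h with h' | h'
    · exact Prod.Lex.left _ _ h'
    · rw [h']; exact Prod.Lex.right _ (by simp)
  · rename_i hvc
    refine Prod.Lex.left _ _ (pv_meas_lt g c rest _ vis (PySem.Set.add vis c) c ?_ (Or.inr rfl) (by simpa using hvc) ?_)
    · intro x hx
      exact pv_getD_sub g c x (List.mem_filter.1 hx).1
    · intro x hx
      rw [pv_contains_add] at hx
      constructor
      · cases h : PySem.Set.contains vis x
        · rfl
        · rw [h] at hx; simp at hx
      · intro h; subst h; simp at hx

-- outer loop of A: for NODE in NODES: ... if COMPONENT: COMPONENTS.append(COMPONENT)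
def smart_connected_components_py (NODES : List Int) (UNDIRECTED_EDGES : List (Int × Int))
    (DIRECTED_EDGES : List (Int × Int)) : List (List Int) :=
  if UNDIRECTED_EDGES = [] then []
  else
    let indeg := pvA_indeg NODES DIRECTED_EDGES
    let multi := pvMulti indeg
    let group := pvA_group DIRECTED_EDGES multi
    let g := pvA_graph NODES UNDIRECTED_EDGES multi group
    (NODES.foldl
      (fun (st : PySem.Set Int × List (List Int)) n =>
        if PySem.Set.contains st.1 n then st
        else
          let r := pvA_bfs g [n] st.1 PySem.Set.empty
          if r.2 ≠ [] then (r.1, st.2 ++ [r.2]) else (r.1, st.2))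
      (PySem.Set.empty, [])).2

-- ===== PORT B =====
-- one pass over DIRECTED_EDGES: indegree counting and the smallest coverer per node together
def pvB_degBest (NODES : List Int) (DIRECTED_EDGES : List (Int × Int)) :
    PySem.Dict Int Int × PySem.Dict Int Int :=
  DIRECTED_EDGES.foldl
    (fun p e =>
      if p.1.contains e.2 then
        (p.1.modify e.2 0 (· + 1),
         if !p.2.contains e.2 || e.1 < p.2.getD e.2 0 then p.2.insert e.2 e.1 else p.2)
      else p)
    (NODES.foldl (fun d n => d.insert n (0 : Int)) PySem.Dict.empty, PySem.Dict.empty)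

-- the UNDIRECTED_EDGES loop of B (best_coverer[x] is always present when x is multi-covered)
def pvB_graph (NODES : List Int) (UNDIRECTED_EDGES : List (Int × Int))
    (multi : PySem.Set Int) (best : PySem.Dict Int Int) : PySem.Dict Int (PySem.Set Int) :=
  UNDIRECTED_EDGES.foldl
    (fun g e =>
      if PySem.Set.contains multi e.2 then
        if e.1 = best.getD e.2 0 then pvLink g e.1 e.2 else g
      else if PySem.Set.contains multi e.1 then
        if e.2 = best.getD e.1 0 then pvLink g e.1 e.2 else g
      else pvLink g e.1 e.2)
    (pvGraphInit NODES)

-- sequential 'new' elements of one neighbour scan of B (those not yet visited when reached)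
def pvSeqNew (vis : PySem.Set Int) : List Int → List Int
  | [] => []
  | n :: ns =>
    if PySem.Set.contains vis n then pvSeqNew vis ns
    else n :: pvSeqNew (PySem.Set.add vis n) ns

lemma pvSeqNew_mem : ∀ (ns : List Int) (vis : PySem.Set Int) (x : Int),
    x ∈ pvSeqNew vis ns → x ∈ ns ∧ PySem.Set.contains vis x = false := by
  intro ns
  induction ns with
  | nil => intro vis x hx; cases hx
  | cons n ns ih =>
    intro vis x hx
    unfold pvSeqNew at hx
    by_cases h : PySem.Set.contains vis n = true
    · rw [if_pos h] at hx
      obtain ⟨h1, h2⟩ := ih vis x hx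
      exact ⟨List.mem_cons_of_mem _ h1, h2⟩
    · rw [if_neg h] at hx
      rcases List.mem_cons.1 hx with h' | h'
      · subst h'
        exact ⟨List.mem_cons_self, by cases hc : PySem.Set.contains vis x; rfl; exact absurd hc h⟩
      · obtain ⟨h1, h2⟩ := ih _ x h'
        rw [pv_contains_add] at h2
        refine ⟨List.mem_cons_of_mem _ h1, ?_⟩
        cases hc : PySem.Set.contains vis x
        · rfl
        · rw [hc] at h2; simp at h2

lemma pvB_fold_eq : ∀ (nbrs q : List Int) (vis comp : PySem.Set Int),
    nbrs.foldl
      (fun (st : List Int × PySem.Set Int × PySem.Set Int) n =>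
        if PySem.Set.contains st.2.1 n then st
        else (st.1 ++ [n], PySem.Set.add st.2.1 n, PySem.Set.add st.2.2 n))
      (q, vis, comp)
    = (q ++ pvSeqNew vis nbrs, PySem.Set.update vis (pvSeqNew vis nbrs),
       PySem.Set.update comp (pvSeqNew vis nbrs)) := by
  intro nbrs
  induction nbrs with
  | nil => intro q vis comp; simp [pvSeqNew, PySem.Set.update]
  | cons n ns ih =>
    intro q vis comp
    rw [List.foldl_cons]
    by_cases h : PySem.Set.contains vis n = true
    · simp only [h, if_pos]
      rw [ih, pvSeqNew, if_pos h]
    · have h' : PySem.Set.contains vis n = false := by cases hc : PySem.Set.contains vis n; rfl; exact absurd hc h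
      simp only [h', Bool.false_eq_true, if_neg, not_false_iff]
      rw [ih]
      have hseq : pvSeqNew vis (n :: ns) = n :: pvSeqNew (PySem.Set.add vis n) ns := by
        rw [pvSeqNew, if_neg (by rw [h']; exact Bool.false_ne_true)]
      rw [hseq, PySem.Set.update_cons, PySem.Set.update_cons, List.append_assoc]
      rfl

-- while queue: current = queue.popleft(); for n in graph.get(current, ()): if unseen: mark+record+enqueue
def pvB_bfs (g : PySem.Dict Int (PySem.Set Int)) (q : List Int) (vis comp : PySem.Set Int) :
    PySem.Set Int × PySem.Set Int :=
  match q with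
  | [] => (vis, comp)
  | c :: rest =>
    let st := (PySem.Dict.getD g c PySem.Set.empty).foldl
      (fun (st : List Int × PySem.Set Int × PySem.Set Int) n =>
        if PySem.Set.contains st.2.1 n then st
        else (st.1 ++ [n], PySem.Set.add st.2.1 n, PySem.Set.add st.2.2 n))
      (rest, vis, comp)
    pvB_bfs g st.1 st.2.1 st.2.2
termination_by (pvMeas g q vis, q.length)
decreasing_by
  simp only [dite_eq_ite]
  rw [pvB_fold_eq]
  cases hS : pvSeqNew vis (PySem.Dict.getD g c PySem.Set.empty) with
  | nil =>
    have h := pv_meas_le g c rest [] vis vis (by intro x hx; cases hx) (fun _ h => h)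
    simp only [List.append_nil] at h
    simp only [List.append_nil, PySem.Set.update, List.foldl_nil]
    rcases lt_or_eq_of_le h with h' | h'
    · exact Prod.Lex.left _ _ h'
    · rw [h']; exact Prod.Lex.right _ (by simp)
  | cons m ms =>
    have hmem : ∀ x ∈ m :: ms, x ∈ pvSeqNew vis (PySem.Dict.getD g c PySem.Set.empty) := by
      rw [hS]; exact fun x h => h
    refine Prod.Lex.left _ _ ?_
    refine pv_meas_lt g c rest (m :: ms) vis (PySem.Set.update vis (m :: ms)) m ?_ ?_ ?_ ?_
    · intro x hx
      exact pv_getD_sub g c x (pvSeqNew_mem _ _ x (hmem x hx)).1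
    · exact Or.inl (pv_getD_sub g c m (pvSeqNew_mem _ vis m (hmem m List.mem_cons_self)).1)
    · exact (pvSeqNew_mem _ vis m (hmem m List.mem_cons_self)).2
    · intro x hx
      have hnx : x ∉ PySem.Set.update vis (m :: ms) := pv_not_mem _ _ hx
      constructor
      · exact pv_not_contains _ _ (fun hxv => hnx ((pv_mem_update _ _ _).2 (Or.inl hxv)))
      · rintro rfl; exact hnx ((pv_mem_update _ _ _).2 (Or.inr List.mem_cons_self))

def smart_connected_components_py_alt (NODES : List Int) (UNDIRECTED_EDGES : List (Int × Int))
    (DIRECTED_EDGES : List (Int × Int)) : List (List Int) :=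
  if UNDIRECTED_EDGES = [] then []
  else
    let p := pvB_degBest NODES DIRECTED_EDGES
    let multi := pvMulti p.1
    let g := pvB_graph NODES UNDIRECTED_EDGES multi p.2
    (NODES.foldl
      (fun (st : PySem.Set Int × List (List Int)) n =>
        if PySem.Set.contains st.1 n then st
        else
          let r := pvB_bfs g [n] (PySem.Set.add st.1 n) (PySem.Set.add PySem.Set.empty n)
          (r.1, st.2 ++ [r.2]))
      (PySem.Set.empty, [])).2

-- ===== PRECONDITION & SPEC =====
def Spec_smart_connected_components_py (NODES : List Int) (UNDIRECTED_EDGES : List (Int × Int)) (DIRECTED_EDGES : List (Int × Int)) (out : List (List Int)) : Prop := out = smart_connected_components_py_alt NODES UNDIRECTED_EDGES DIRECTED_EDGES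
instance (NODES : List Int) (UNDIRECTED_EDGES : List (Int × Int)) (DIRECTED_EDGES : List (Int × Int)) (out : List (List Int)) : Decidable (Spec_smart_connected_components_py NODES UNDIRECTED_EDGES DIRECTED_EDGES out) := by unfold Spec_smart_connected_components_py; infer_instance

-- ===== CLAIM (what is proved, stated in full; the proofs are below) =====
def Claim_equal_smart_connected_components_py : Prop := ∀ (NODES : List Int) (UNDIRECTED_EDGES : List (Int × Int)) (DIRECTED_EDGES : List (Int × Int)), Dom_smart_connected_components_py NODES UNDIRECTED_EDGES DIRECTED_EDGES → Spec_smart_connected_components_py NODES UNDIRECTED_EDGES DIRECTED_EDGES (smart_connected_components_py NODES UNDIRECTED_EDGES DIRECTED_EDGES)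

-- ===== LEMMAS AND PROOFS =====


-- ---- dictionary side: A's per-node minimum scan equals B's one-pass minimum ----

lemma pv_degBest_fst (NODES : List Int) (DIRECTED_EDGES : List (Int × Int)) :
    (pvB_degBest NODES DIRECTED_EDGES).1 = pvA_indeg NODES DIRECTED_EDGES := by
  unfold pvB_degBest pvA_indeg
  generalize (NODES.foldl (fun d n => d.insert n (0 : Int)) PySem.Dict.empty) = d0
  generalize hb : (PySem.Dict.empty : PySem.Dict Int Int) = b0
  clear hb
  induction DIRECTED_EDGES generalizing d0 b0 with
  | nil => rfl
  | cons e de ih =>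
    simp only [List.foldl_cons]
    by_cases h : d0.contains e.2 = true
    · rw [if_pos h, if_pos h]
      exact ih _ _
    · rw [if_neg h, if_neg h]
      exact ih _ _

lemma pv_init_contains (NODES : List Int) (t : Int) :
    (NODES.foldl (fun d n => d.insert n (0 : Int)) PySem.Dict.empty).contains t = true ↔ t ∈ NODES := by
  rw [PySem.Dict.contains_iff_mem_keys]
  rw [show (NODES.foldl (fun d n => d.insert n (0 : Int)) PySem.Dict.empty)
        = (NODES.foldl (fun d n => d.insert n ((fun (_ : PySem.Dict Int Int) (_ : Int) => (0:Int)) d n)) PySem.Dict.empty) from rfl]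
  rw [PySem.Dict.keys_foldl_insert]
  rw [show (PySem.Dict.empty : PySem.Dict Int Int).keys = ([] : List Int) from rfl]
  rw [show PySem.Set.update ([] : List Int) NODES = PySem.Set.ofList NODES from rfl]
  exact PySem.Set.mem_ofList _ _

lemma pv_indeg_step_contains (d : PySem.Dict Int Int) (e : Int × Int) (t : Int) :
    ((if d.contains e.2 then d.modify e.2 0 (· + 1) else d)).contains t = d.contains t := by
  by_cases h : d.contains e.2 = true
  · rw [if_pos h]
    unfold PySem.Dict.modify
    rw [PySem.Dict.contains_insert]
    by_cases ht : t = e.2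
    · subst ht; simp [h]
    · simp [ht]
  · rw [if_neg h]

lemma pv_indeg_fold_contains (de : List (Int × Int)) (d : PySem.Dict Int Int) (t : Int) :
    (de.foldl (fun d e => if d.contains e.2 then d.modify e.2 0 (· + 1) else d) d).contains t = d.contains t := by
  induction de generalizing d with
  | nil => rfl
  | cons e de ih => rw [List.foldl_cons, ih, pv_indeg_step_contains]

lemma pv_indeg_contains (NODES : List Int) (DIRECTED_EDGES : List (Int × Int)) (t : Int) :
    (pvA_indeg NODES DIRECTED_EDGES).contains t = true ↔ t ∈ NODES := by
  unfold pvA_indeg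
  rw [pv_indeg_fold_contains]
  exact pv_init_contains NODES t

lemma pv_init_getD (NODES : List Int) (t : Int) :
    (NODES.foldl (fun d n => d.insert n (0 : Int)) PySem.Dict.empty).getD t 0 = 0 := by
  have : ∀ (l : List Int) (d : PySem.Dict Int Int), d.getD t 0 = 0 →
      (l.foldl (fun d n => d.insert n (0 : Int)) d).getD t 0 = 0 := by
    intro l
    induction l with
    | nil => intro d h; exact h
    | cons n l ih =>
      intro d h
      rw [List.foldl_cons]
      refine ih _ ?_
      rw [PySem.Dict.getD_insert]
      split <;> simp [h]
  exact this NODES _ (by rfl)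

lemma pv_indeg_fold_getD (de : List (Int × Int)) (d : PySem.Dict Int Int) (t : Int)
    (hc : d.contains t = true) :
    (de.foldl (fun d e => if d.contains e.2 then d.modify e.2 0 (· + 1) else d) d).getD t 0
      = d.getD t 0 + ((de.filter (fun e => e.2 = t)).length : Int) := by
  induction de generalizing d with
  | nil => simp
  | cons e de ih =>
    rw [List.foldl_cons]
    by_cases h : d.contains e.2 = true
    · rw [if_pos h]
      have hc' : (d.modify e.2 0 (· + 1)).contains t = true := by
        unfold PySem.Dict.modify
        rw [PySem.Dict.contains_insert]
        simp [hc]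
      rw [ih _ hc']
      rw [PySem.Dict.getD_modify]
      by_cases ht : t = e.2
      · subst ht
        rw [if_pos rfl]
        rw [List.filter_cons_of_pos (by simp)]
        simp
        omega
      · rw [if_neg ht]
        rw [List.filter_cons_of_neg (by simp; exact fun hh => ht hh.symm)]
    · rw [if_neg h]
      have ht : ¬ e.2 = t := fun hh => h (hh ▸ hc)
      rw [ih _ hc]
      rw [List.filter_cons_of_neg (by simpa using ht)]

lemma pv_indeg_getD (NODES : List Int) (DIRECTED_EDGES : List (Int × Int)) (t : Int)
    (ht : t ∈ NODES) :
    (pvA_indeg NODES DIRECTED_EDGES).getD t 0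
      = ((DIRECTED_EDGES.filter (fun e => e.2 = t)).length : Int) := by
  unfold pvA_indeg
  rw [pv_indeg_fold_getD _ _ _ ((pv_init_contains NODES t).2 ht), pv_init_getD]
  simp

lemma pv_indeg_keys_nodup (NODES : List Int) (DIRECTED_EDGES : List (Int × Int)) :
    (pvA_indeg NODES DIRECTED_EDGES).keys.Nodup := by
  unfold pvA_indeg
  have hinit : (NODES.foldl (fun d n => d.insert n (0 : Int)) PySem.Dict.empty).keys.Nodup := by
    refine PySem.Dict.nodup_keys_foldl_insert NODES (fun _ _ => (0:Int)) PySem.Dict.empty ?_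
    simp [PySem.Dict.keys_empty]
  generalize (NODES.foldl (fun d n => d.insert n (0 : Int)) PySem.Dict.empty) = d at hinit ⊢
  induction DIRECTED_EDGES generalizing d with
  | nil => exact hinit
  | cons e de ih =>
    rw [List.foldl_cons]
    refine ih _ ?_
    by_cases h : d.contains e.2 = true
    · rw [if_pos h]
      unfold PySem.Dict.modify
      rw [PySem.Dict.keys_insert_of_contains _ _ h]
      exact hinit
    · rw [if_neg h]; exact hinit

lemma pv_multi_mem (indeg : PySem.Dict Int Int) (hnd : indeg.keys.Nodup) (t : Int) :
    t ∈ pvMulti indeg ↔ indeg.contains t = true ∧ 1 < indeg.getD t 0 := by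
  unfold pvMulti
  rw [PySem.Set.mem_ofList]
  constructor
  · intro h
    obtain ⟨p, hp, hpt⟩ := List.mem_map.1 h
    obtain ⟨hpi, hpv⟩ := List.mem_filter.1 hp
    subst hpt
    have hg : indeg.get? p.1 = some p.2 := PySem.Dict.get?_of_mem_items _ hpi hnd
    constructor
    · rw [PySem.Dict.contains_eq_isSome_get?, hg]; rfl
    · rw [PySem.Dict.getD_of_get?_eq_some _ _ hg]
      simpa using hpv
  · rintro ⟨hc, hv⟩
    rw [PySem.Dict.contains_eq_isSome_get?] at hc
    cases hg : indeg.get? t with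
    | none => rw [hg] at hc; cases hc
    | some v =>
      have hit := PySem.Dict.mem_items_of_get?_eq_some _ hg
      rw [PySem.Dict.getD_of_get?_eq_some _ _ hg] at hv
      exact List.mem_map.2 ⟨(t, v), List.mem_filter.2 ⟨hit, by simpa using hv⟩, rfl⟩

lemma pv_coverers_eq (DIRECTED_EDGES : List (Int × Int)) (n : Int) :
    pvA_coverers DIRECTED_EDGES n
      = (DIRECTED_EDGES.filter (fun e => e.2 = n)).map (fun e => e.1) := by
  unfold pvA_coverers
  have := PySem.List.foldl_append_ite (fun e : Int × Int => e.2 = n) (fun e => e.1) DIRECTED_EDGES []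
  simpa using this

lemma pv_fold_get?_untouched (DIRECTED_EDGES : List (Int × Int)) (l : List Int)
    (d : PySem.Dict Int Int) (t : Int) (ht : t ∉ l) :
    (l.foldl (fun d n =>
      match PySem.List.min? (pvA_coverers DIRECTED_EDGES n) (fun y => y) with
      | some m => d.insert n m
      | none => d) d).get? t = d.get? t := by
  induction l generalizing d with
  | nil => rfl
  | cons n l ih =>
    rw [List.foldl_cons]
    have hnt : t ≠ n := fun h => ht (h ▸ List.mem_cons_self)
    rw [ih _ (fun h => ht (List.mem_cons_of_mem _ h))]
    cases PySem.List.min? (pvA_coverers DIRECTED_EDGES n) (fun y => y) with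
    | some m => exact PySem.Dict.get?_insert_of_ne _ _ hnt
    | none => rfl

lemma pv_group_get? (DIRECTED_EDGES : List (Int × Int)) (multi : List Int)
    (hnd : multi.Nodup) (t : Int) (ht : t ∈ multi) :
    (pvA_group DIRECTED_EDGES multi).get? t
      = PySem.List.min? (pvA_coverers DIRECTED_EDGES t) (fun y => y) := by
  unfold pvA_group
  have : ∀ (l : List Int) (d : PySem.Dict Int Int), l.Nodup → t ∈ l → d.get? t = none →
      (l.foldl (fun d n =>
        match PySem.List.min? (pvA_coverers DIRECTED_EDGES n) (fun y => y) with
        | some m => d.insert n m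
        | none => d) d).get? t
      = PySem.List.min? (pvA_coverers DIRECTED_EDGES t) (fun y => y) := by
    intro l
    induction l with
    | nil => intro d _ h; cases h
    | cons n l ih =>
      intro d hnd ht hd
      rw [List.foldl_cons]
      rcases List.mem_cons.1 ht with rfl | htl
      · have hnl : t ∉ l := (List.nodup_cons.1 hnd).1
        rw [pv_fold_get?_untouched _ _ _ _ hnl]
        cases hm : PySem.List.min? (pvA_coverers DIRECTED_EDGES t) (fun y => y) with
        | some m => exact PySem.Dict.get?_insert_self _ _ _
        | none => exact hd
      · refine ih _ (List.nodup_cons.1 hnd).2 htl ?_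
        have hnt : t ≠ n := by
          rintro rfl; exact (List.nodup_cons.1 hnd).1 htl
        cases PySem.List.min? (pvA_coverers DIRECTED_EDGES n) (fun y => y) with
        | some m => rw [PySem.Dict.get?_insert_of_ne _ _ hnt]; exact hd
        | none => exact hd
  exact this multi _ hnd ht (by rfl)

lemma pv_best_get? (NODES : List Int) (de : List (Int × Int)) (d b : PySem.Dict Int Int) (t : Int)
    (hc : ∀ k, d.contains k = true ↔ k ∈ NODES) :
    (de.foldl
      (fun p e =>
        if p.1.contains e.2 then
          (p.1.modify e.2 0 (· + 1),
           if !p.2.contains e.2 || e.1 < p.2.getD e.2 0 then p.2.insert e.2 e.1 else p.2)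
        else p)
      (d, b)).2.get? t
    = if t ∈ NODES then
        ((de.filter (fun e => e.2 = t)).map (fun e => e.1)).foldl
          (fun acc x => match acc with
            | none => some x
            | some m => if x < m then some x else some m)
          (b.get? t)
      else b.get? t := by
  induction de generalizing d b with
  | nil => split <;> rfl
  | cons e de ih =>
    rw [List.foldl_cons]
    by_cases h : d.contains e.2 = true
    · rw [if_pos h]
      have hc' : ∀ k, (d.modify e.2 0 (· + 1)).contains k = true ↔ k ∈ NODES := by
        intro k
        unfold PySem.Dict.modify
        rw [PySem.Dict.contains_insert]
        by_cases hk : k = e.2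
        · subst hk
          have hm := (hc e.2).1 h
          simp [hm]
        · simp [hk, hc]
      rw [ih _ _ hc']
      by_cases htN : t ∈ NODES
      · rw [if_pos htN, if_pos htN]
        by_cases hte : e.2 = t
        · subst hte
          rw [List.filter_cons_of_pos (by simp)]
          simp only [List.map_cons, List.foldl_cons]
          congr 1
          by_cases hb : b.contains e.2 = true
          · cases hg : b.get? e.2 with
            | none =>
              rw [PySem.Dict.contains_eq_isSome_get?, hg] at hb; cases hb
            | some m =>
              rw [PySem.Dict.getD_of_get?_eq_some _ _ hg, hb]
              simp only [Bool.not_true, Bool.false_or]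
              by_cases hlt : e.1 < m
              · rw [if_pos (by simpa using hlt), PySem.Dict.get?_insert_self]
                simp [hlt]
              · rw [if_neg (by simpa using hlt), hg]
                simp [hlt]
          · have hb' : b.contains e.2 = false := by cases hbb : b.contains e.2; rfl; exact absurd hbb hb
            have hg : b.get? e.2 = none := by
              cases hg : b.get? e.2 with
              | none => rfl
              | some m => rw [PySem.Dict.contains_eq_isSome_get?, hg] at hb'; cases hb'
            rw [hb']
            simp only [Bool.not_false, Bool.true_or, if_pos]
            rw [PySem.Dict.get?_insert_self, hg]
        · rw [List.filter_cons_of_neg (by simpa using hte)]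
          congr 1
          have htne : t ≠ e.2 := fun hh => hte hh.symm
          by_cases hcond : (!b.contains e.2 || decide (e.1 < b.getD e.2 0)) = true
          · rw [if_pos hcond]
            exact PySem.Dict.get?_insert_of_ne _ _ htne
          · rw [if_neg hcond]
      · rw [if_neg htN, if_neg htN]
        have hte : ¬ t = e.2 := fun hh => htN ((hc t).1 (hh ▸ h))
        by_cases hcond : (!b.contains e.2 || decide (e.1 < b.getD e.2 0)) = true
        · rw [if_pos hcond]
          exact PySem.Dict.get?_insert_of_ne _ _ hte
        · rw [if_neg hcond]
    · rw [if_neg h]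
      rw [ih _ _ hc]
      by_cases htN : t ∈ NODES
      · rw [if_pos htN, if_pos htN]
        have hte : ¬ e.2 = t := fun hh => h ((hc e.2).2 (hh ▸ htN))
        rw [List.filter_cons_of_neg (by simpa using hte)]
      · rw [if_neg htN, if_neg htN]


-- for every multi-covered node, A's NODE_TO_GROUP entry and B's best_coverer entry agree
lemma pv_group_eq_best (NODES : List Int) (DIRECTED_EDGES : List (Int × Int)) (t : Int)
    (ht : t ∈ pvMulti (pvA_indeg NODES DIRECTED_EDGES)) :
    (pvA_group DIRECTED_EDGES (pvMulti (pvA_indeg NODES DIRECTED_EDGES))).contains t = true ∧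
    (pvA_group DIRECTED_EDGES (pvMulti (pvA_indeg NODES DIRECTED_EDGES))).getD t 0
      = (pvB_degBest NODES DIRECTED_EDGES).2.getD t 0 := by
  have hnd := pv_indeg_keys_nodup NODES DIRECTED_EDGES
  have hmnd : (pvMulti (pvA_indeg NODES DIRECTED_EDGES)).Nodup := PySem.Set.nodup_ofList _
  obtain ⟨hcont, hdeg⟩ := (pv_multi_mem _ hnd t).1 ht
  have htN : t ∈ NODES := (pv_indeg_contains _ _ t).1 hcont
  have hcnt : 1 < ((DIRECTED_EDGES.filter (fun e => e.2 = t)).length : Int) := by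
    rw [← pv_indeg_getD NODES DIRECTED_EDGES t htN]; exact hdeg
  have hne : (DIRECTED_EDGES.filter (fun e => e.2 = t)).map (fun e => e.1) ≠ [] := by
    intro h
    have := List.map_eq_nil_iff.1 h
    rw [this] at hcnt
    simp at hcnt
  have hgg := pv_group_get? DIRECTED_EDGES _ hmnd t ht
  rw [pv_coverers_eq] at hgg
  have hbb := pv_best_get? NODES DIRECTED_EDGES
      (NODES.foldl (fun d n => d.insert n (0 : Int)) PySem.Dict.empty) PySem.Dict.empty t
      (fun k => pv_init_contains NODES k)
  rw [if_pos htN] at hbb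
  have hbb' : (pvB_degBest NODES DIRECTED_EDGES).2.get? t
      = PySem.List.min? ((DIRECTED_EDGES.filter (fun e => e.2 = t)).map (fun e => e.1)) (fun y => y) := by
    unfold pvB_degBest
    rw [hbb]
    rw [show (PySem.Dict.empty : PySem.Dict Int Int).get? t = none from rfl]
    unfold PySem.List.min?
    refine PySem.List.foldl_congr_mem _ _ _ _ ?_
    intro acc x _
    cases acc <;> rfl
  cases hm : PySem.List.min? ((DIRECTED_EDGES.filter (fun e => e.2 = t)).map (fun e => e.1)) (fun y => y) with
  | none => exact absurd ((PySem.List.min?_eq_none_iff _ _).1 hm) hne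
  | some m =>
    refine ⟨?_, ?_⟩
    · rw [PySem.Dict.contains_eq_isSome_get?, hgg, hm]; rfl
    · rw [PySem.Dict.getD_eq_get?_getD, PySem.Dict.getD_eq_get?_getD, hgg, hbb', hm]

-- with agreeing coverer data the two edge loops build the same adjacency dict
lemma pv_graph_eq (NODES : List Int) (UNDIRECTED_EDGES DIRECTED_EDGES : List (Int × Int)) :
    pvA_graph NODES UNDIRECTED_EDGES (pvMulti (pvA_indeg NODES DIRECTED_EDGES))
        (pvA_group DIRECTED_EDGES (pvMulti (pvA_indeg NODES DIRECTED_EDGES)))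
      = pvB_graph NODES UNDIRECTED_EDGES (pvMulti (pvA_indeg NODES DIRECTED_EDGES))
        (pvB_degBest NODES DIRECTED_EDGES).2 := by
  unfold pvA_graph pvB_graph
  refine PySem.List.foldl_congr_mem _ _ _ _ ?_
  intro g e _
  by_cases h2 : PySem.Set.contains (pvMulti (pvA_indeg NODES DIRECTED_EDGES)) e.2 = true
  · obtain ⟨hcont, hgd⟩ := pv_group_eq_best NODES DIRECTED_EDGES e.2
      ((PySem.Set.contains_iff _ _).1 h2)
    rw [h2, hcont, hgd]
    simp
  · have h2' : PySem.Set.contains (pvMulti (pvA_indeg NODES DIRECTED_EDGES)) e.2 = false := by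
      cases hh : PySem.Set.contains (pvMulti (pvA_indeg NODES DIRECTED_EDGES)) e.2
      · rfl
      · exact absurd hh h2
    rw [h2']
    simp only [Bool.false_and, Bool.false_eq_true, if_neg, not_false_iff]
    by_cases h1 : PySem.Set.contains (pvMulti (pvA_indeg NODES DIRECTED_EDGES)) e.1 = true
    · obtain ⟨hcont, hgd⟩ := pv_group_eq_best NODES DIRECTED_EDGES e.1
        ((PySem.Set.contains_iff _ _).1 h1)
      rw [h1, hcont, hgd]
      simp
    · have h1' : PySem.Set.contains (pvMulti (pvA_indeg NODES DIRECTED_EDGES)) e.1 = false := by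
        cases hh : PySem.Set.contains (pvMulti (pvA_indeg NODES DIRECTED_EDGES)) e.1
        · rfl
        · exact absurd hh h1
      rw [h1']
      simp


-- ---- BFS side ----

lemma pv_ofList_filter (p : Int → Bool) (l : List Int) :
    PySem.Set.ofList (l.filter p) = (PySem.Set.ofList l).filter p := by
  induction l with
  | nil => rfl
  | cons x l ih =>
    by_cases hp : p x = true
    · rw [List.filter_cons_of_pos hp, PySem.Set.ofList_cons, PySem.Set.ofList_cons,
          List.filter_cons_of_pos hp, ih]
      unfold PySem.Set.discard
      congr 1
      rw [List.filter_filter, List.filter_filter]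
      exact List.filter_congr (fun y _ => by rw [Bool.and_comm])
    · have hp' : p x = false := by cases hh : p x; rfl; exact absurd hh hp
      rw [List.filter_cons_of_neg (by simp [hp']), PySem.Set.ofList_cons,
          List.filter_cons_of_neg (by simp [hp']), ih]
      unfold PySem.Set.discard
      rw [List.filter_filter]
      refine (List.filter_congr ?_).symm
      intro y _
      by_cases hy : y = x
      · subst hy; simp [hp']
      · simp [hy]

lemma pvSeqNew_filter (ns : List Int) (vis : PySem.Set Int) (h : ns.Nodup) :
    pvSeqNew vis ns = ns.filter (fun n => !PySem.Set.contains vis n) := by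
  induction ns generalizing vis with
  | nil => rfl
  | cons n l ih =>
    obtain ⟨hn, hl⟩ := List.nodup_cons.1 h
    by_cases hc : PySem.Set.contains vis n = true
    · rw [pvSeqNew, if_pos hc, List.filter_cons_of_neg (by simp; exact (PySem.Set.contains_iff _ _).1 hc), ih _ hl]
    · have hc' : PySem.Set.contains vis n = false := by
        cases hh : PySem.Set.contains vis n; rfl; exact absurd hh hc
      rw [pvSeqNew, if_neg (by rw [hc']; exact Bool.false_ne_true), List.filter_cons_of_pos (by simp; exact pv_not_mem _ _ hc'), ih _ hl]
      congr 1
      refine List.filter_congr ?_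
      intro y hy
      rw [pv_contains_add]
      have hyn : (y == n) = false := by
        simp only [beq_eq_false_iff_ne, ne_eq]
        rintro rfl; exact hn hy
      rw [hyn, Bool.or_false]

lemma pv_get?_values (g : PySem.Dict Int (PySem.Set Int)) (c : Int) (s : PySem.Set Int)
    (h : g.get? c = some s) : s ∈ g.values :=
  List.mem_map.2 ⟨(c, s), PySem.Dict.mem_items_of_get?_eq_some _ h, rfl⟩

lemma pv_getD_nodup (g : PySem.Dict Int (PySem.Set Int)) (c : Int)
    (h : ∀ s ∈ g.values, List.Nodup s) : (PySem.Dict.getD g c PySem.Set.empty).Nodup := by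
  cases hq : g.get? c with
  | none => rw [PySem.Dict.getD_of_get?_eq_none _ _ hq]; exact List.nodup_nil
  | some s => rw [PySem.Dict.getD_of_get?_eq_some _ _ hq]; exact h s (pv_get?_values g c s hq)

lemma pv_nodup_add (s : PySem.Set Int) (x : Int) (h : s.Nodup) : (PySem.Set.add s x).Nodup := by
  unfold PySem.Set.add
  split
  · exact h
  · rename_i hc
    have hx : x ∉ s := pv_not_mem s x (by cases hcc : PySem.Set.contains s x; rfl; exact absurd hcc hc)
    refine List.Nodup.append h (List.nodup_singleton x) ?_
    intro a ha hax
    rw [List.mem_singleton] at hax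
    exact hx (hax ▸ ha)

lemma pv_link_values_nodup (g : PySem.Dict Int (PySem.Set Int)) (u v : Int)
    (h : ∀ s ∈ g.values, List.Nodup s) : ∀ s ∈ (pvLink g u v).values, List.Nodup s := by
  unfold pvLink
  have h1 : ∀ s ∈ (g.insert u (PySem.Set.add (g.getD u PySem.Set.empty) v)).values, List.Nodup s := by
    intro s hs
    rcases PySem.Dict.mem_values_insert _ _ _ _ hs with rfl | hs'
    · exact pv_nodup_add _ _ (pv_getD_nodup g u h)
    · exact h s hs'
  intro s hs
  rcases PySem.Dict.mem_values_insert _ _ _ _ hs with rfl | hs'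
  · exact pv_nodup_add _ _ (pv_getD_nodup _ v h1)
  · exact h1 s hs'

lemma pv_graph_values_nodup (NODES : List Int) (UNDIRECTED_EDGES : List (Int × Int))
    (multi : PySem.Set Int) (group : PySem.Dict Int Int) :
    ∀ s ∈ (pvA_graph NODES UNDIRECTED_EDGES multi group).values, List.Nodup s := by
  unfold pvA_graph
  have hinit : ∀ s ∈ (pvGraphInit NODES).values, List.Nodup s := by
    unfold pvGraphInit
    have : ∀ (l : List Int) (g : PySem.Dict Int (PySem.Set Int)),
        (∀ s ∈ g.values, List.Nodup s) →
        ∀ s ∈ (l.foldl (fun g n => g.insert n PySem.Set.empty) g).values, List.Nodup s := by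
      intro l
      induction l with
      | nil => intro g hg; exact hg
      | cons n l ih =>
        intro g hg
        rw [List.foldl_cons]
        refine ih _ ?_
        intro s hs
        rcases PySem.Dict.mem_values_insert _ _ _ _ hs with rfl | hs'
        · exact List.nodup_nil
        · exact hg s hs'
    refine this NODES _ ?_
    intro s hs
    simp [PySem.Dict.empty, PySem.Dict.values] at hs
  generalize pvGraphInit NODES = g0 at hinit ⊢
  induction UNDIRECTED_EDGES generalizing g0 with
  | nil => exact hinit
  | cons e ue ih =>
    rw [List.foldl_cons]
    refine ih _ ?_
    split
    · split
      · exact pv_link_values_nodup _ _ _ hinit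
      · exact hinit
    · split
      · split
        · exact pv_link_values_nodup _ _ _ hinit
        · exact hinit
      · exact pv_link_values_nodup _ _ _ hinit

lemma pv_update_ne (s : PySem.Set Int) (l : List Int) (h : s ≠ []) :
    PySem.Set.update s l ≠ [] := by
  induction l generalizing s with
  | nil => exact h
  | cons x l ih =>
    rw [PySem.Set.update_cons]
    refine ih _ ?_
    unfold PySem.Set.add
    split
    · exact h
    · simp

lemma pvB_bfs_comp_extend (g : PySem.Dict Int (PySem.Set Int)) (q : List Int)
    (vis comp : PySem.Set Int) : comp ≠ [] → (pvB_bfs g q vis comp).2 ≠ [] := by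
  fun_induction pvB_bfs g q vis comp with
  | case1 vis comp => exact fun h => h
  | case2 vis comp c rest st ih =>
    intro h
    refine ih ?_
    show ((PySem.Dict.getD g c PySem.Set.empty).foldl
        (fun (st : List Int × PySem.Set Int × PySem.Set Int) n =>
          if PySem.Set.contains st.2.1 n then st
          else (st.1 ++ [n], PySem.Set.add st.2.1 n, PySem.Set.add st.2.2 n))
        (rest, vis, comp)).2.2 ≠ []
    rw [pvB_fold_eq]
    exact pv_update_ne _ _ h


lemma pv_contains_eq_decide (s : PySem.Set Int) (y : Int) :
    PySem.Set.contains s y = decide (y ∈ s) := by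
  by_cases h : y ∈ s
  · rw [(PySem.Set.contains_iff _ _).2 h]; simp [h]
  · rw [pv_not_contains s y h]; simp [h]

lemma pv_contains_update (s : PySem.Set Int) (l : List Int) (y : Int) :
    PySem.Set.contains (PySem.Set.update s l) y
      = (PySem.Set.contains s y || decide (y ∈ l)) := by
  rw [pv_contains_eq_decide, pv_contains_eq_decide]
  by_cases h : y ∈ PySem.Set.update s l
  · rcases (pv_mem_update s l y).1 h with h' | h'
    · simp [h, h']
    · simp [h, h']
  · have h1 : y ∉ s := fun hy => h ((pv_mem_update s l y).2 (Or.inl hy))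
    have h2 : y ∉ l := fun hy => h ((pv_mem_update s l y).2 (Or.inr hy))
    simp [h, h1, h2]

-- the central BFS lemma: A's pop-time-checked queue equals B's deduplicated enqueue-time-checked queue
lemma pv_bfs_eq (g : PySem.Dict Int (PySem.Set Int)) (hg : ∀ s ∈ g.values, List.Nodup s)
    (q : List Int) (vis comp : PySem.Set Int) :
    pvA_bfs g q vis comp
      = pvB_bfs g (PySem.Set.ofList (q.filter (fun x => !PySem.Set.contains vis x)))
          (PySem.Set.update vis (PySem.Set.ofList (q.filter (fun x => !PySem.Set.contains vis x))))
          (PySem.Set.update comp (PySem.Set.ofList (q.filter (fun x => !PySem.Set.contains vis x)))) := by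
  fun_induction pvA_bfs g q vis comp with
  | case1 vis comp =>
    rw [List.filter_nil]
    rw [pvB_bfs.eq_def]
    rfl
  | case2 vis comp c rest hc ih =>
    rw [List.filter_cons_of_neg (by simp; exact (PySem.Set.contains_iff _ _).1 hc)]
    exact ih
  | case3 vis comp c rest hc ih =>
    have hc' : PySem.Set.contains vis c = false := by
      cases hh : PySem.Set.contains vis c; rfl; exact absurd hh hc
    have hnb : (PySem.Dict.getD g c PySem.Set.empty).Nodup := pv_getD_nodup g c hg
    rw [ih]
    rw [List.filter_cons_of_pos (by simp; exact pv_not_mem _ _ hc'), PySem.Set.ofList_cons]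
    conv_rhs => rw [pvB_bfs.eq_def]
    simp only [pvB_fold_eq]
    rw [pvSeqNew_filter _ _ hnb]
    -- abbreviations
    set nbrs := PySem.Dict.getD g c PySem.Set.empty with hnbrs
    set S := PySem.Set.ofList (rest.filter (fun x => !PySem.Set.contains vis x)) with hS
    set T := PySem.Set.discard S c with hT
    -- (c1) T = ofList (rest.filter P1)
    have hc1 : PySem.Set.ofList (rest.filter (fun x => !PySem.Set.contains (PySem.Set.add vis c) x)) = T := by
      have : rest.filter (fun x => !PySem.Set.contains (PySem.Set.add vis c) x)
          = (rest.filter (fun x => !PySem.Set.contains vis x)).filter (fun y => !(y == c)) := by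
        rw [List.filter_filter]
        refine List.filter_congr ?_
        intro y _
        rw [pv_contains_add]
        cases PySem.Set.contains vis y <;> cases hyc : (y == c) <;> rfl
      rw [this, pv_ofList_filter, hT, hS]
      rfl
    -- newA.filter P1 = newA
    have hid : (nbrs.filter (fun n => !PySem.Set.contains (PySem.Set.add vis c) n)).filter
          (fun x => !PySem.Set.contains (PySem.Set.add vis c) x)
        = nbrs.filter (fun n => !PySem.Set.contains (PySem.Set.add vis c) n) := by
      rw [List.filter_filter]
      refine List.filter_congr ?_
      intro y _
      exact Bool.and_self _
    -- (c3) L' = T ++ S2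
    have hnewnd : (nbrs.filter (fun n => !PySem.Set.contains (PySem.Set.add vis c) n)).Nodup :=
      hnb.filter _
    have hc3 : PySem.Set.ofList ((rest ++ nbrs.filter (fun n => !PySem.Set.contains (PySem.Set.add vis c) n)).filter
          (fun x => !PySem.Set.contains (PySem.Set.add vis c) x))
        = T ++ nbrs.filter (fun n => !PySem.Set.contains (PySem.Set.update vis (c :: T)) n) := by
      rw [List.filter_append, hid, PySem.Set.ofList_append, hc1, PySem.Set.update_eq_append_filter,
          PySem.Set.ofList_eq_self_of_nodup _ hnewnd]
      congr 1
      rw [List.filter_filter]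
      refine List.filter_congr ?_
      intro y _
      rw [Bool.eq_iff_iff]
      simp only [Bool.and_eq_true, Bool.not_eq_true', pv_contains_add, pv_contains_update,
        pv_contains_eq_decide, Bool.or_eq_false_iff, decide_eq_false_iff_not, List.mem_cons,
        beq_eq_false_iff_ne, ne_eq]
      constructor
      · rintro ⟨h1, h2⟩ hy
        rcases (pv_mem_update _ _ _).1 hy with hy | hy
        · exact h2 ((PySem.Set.mem_add _ _ _).2 (Or.inl hy))
        · rcases List.mem_cons.1 hy with rfl | hy
          · exact h2 ((PySem.Set.mem_add _ _ _).2 (Or.inr rfl))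
          · exact h1 hy
      · intro h
        refine ⟨fun hy => h ((pv_mem_update _ _ _).2 (Or.inr (List.mem_cons_of_mem _ hy))),
          fun hy => ?_⟩
        rcases (PySem.Set.mem_add _ _ _).1 hy with hy | rfl
        · exact h ((pv_mem_update _ _ _).2 (Or.inl hy))
        · exact h ((pv_mem_update _ _ _).2 (Or.inr List.mem_cons_self))
    rw [hc3]
    -- (c4) the visited and component sets line up
    have hc4 : ∀ s : PySem.Set Int,
        PySem.Set.update (PySem.Set.add s c)
            (T ++ nbrs.filter (fun n => !PySem.Set.contains (PySem.Set.update vis (c :: T)) n))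
          = PySem.Set.update (PySem.Set.update s (c :: T))
            (nbrs.filter (fun n => !PySem.Set.contains (PySem.Set.update vis (c :: T)) n)) := by
      intro s
      rw [← PySem.Set.update_cons, ← PySem.Set.update_append]
      rfl
    rw [hc4 vis, hc4 comp]

-- pointwise equality of the outer per-node steps
lemma pv_outer_step (g : PySem.Dict Int (PySem.Set Int)) (hg : ∀ s ∈ g.values, List.Nodup s)
    (st : PySem.Set Int × List (List Int)) (n : Int) :
    (if PySem.Set.contains st.1 n then st
     else
       let r := pvA_bfs g [n] st.1 PySem.Set.empty
       if r.2 ≠ [] then (r.1, st.2 ++ [r.2]) else (r.1, st.2))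
    = (if PySem.Set.contains st.1 n then st
       else
         let r := pvB_bfs g [n] (PySem.Set.add st.1 n) (PySem.Set.add PySem.Set.empty n)
         (r.1, st.2 ++ [r.2])) := by
  by_cases hc : PySem.Set.contains st.1 n = true
  · rw [if_pos hc, if_pos hc]
  · have hc' : PySem.Set.contains st.1 n = false := by
      cases hh : PySem.Set.contains st.1 n; rfl; exact absurd hh hc
    rw [if_neg hc, if_neg hc]
    have hq : [n].filter (fun x => !PySem.Set.contains st.1 x) = [n] := by
      rw [List.filter_cons_of_pos (by simp; exact pv_not_mem _ _ hc')]
      rfl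
    have hbfs := pv_bfs_eq g hg [n] st.1 PySem.Set.empty
    rw [hq] at hbfs
    have hofl : PySem.Set.ofList [n] = [n] := rfl
    rw [hofl] at hbfs
    have hup1 : PySem.Set.update st.1 [n] = PySem.Set.add st.1 n := rfl
    have hup2 : PySem.Set.update PySem.Set.empty [n] = PySem.Set.add PySem.Set.empty n := rfl
    rw [hup1, hup2] at hbfs
    simp only [hbfs]
    have hne : (pvB_bfs g [n] (PySem.Set.add st.1 n) (PySem.Set.add PySem.Set.empty n)).2 ≠ [] :=
      pvB_bfs_comp_extend g _ _ _ (by simp [PySem.Set.add, PySem.Set.empty])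
    rw [if_pos hne]

-- ===== final assembly =====

-- ===== VERDICT (by name: the statement is the Claim_ definition above) =====
theorem smart_connected_components_py_spec : Claim_equal_smart_connected_components_py := by
  intro NODES UNDIRECTED_EDGES DIRECTED_EDGES _
  unfold Spec_smart_connected_components_py
  unfold smart_connected_components_py smart_connected_components_py_alt
  by_cases hUE : UNDIRECTED_EDGES = []
  · rw [if_pos hUE, if_pos hUE]
  · rw [if_neg hUE, if_neg hUE]
    have hfst := pv_degBest_fst NODES DIRECTED_EDGES
    have hgeq := pv_graph_eq NODES UNDIRECTED_EDGES DIRECTED_EDGES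
    simp only [hfst]
    rw [← hgeq]
    have hg := pv_graph_values_nodup NODES UNDIRECTED_EDGES
      (pvMulti (pvA_indeg NODES DIRECTED_EDGES))
      (pvA_group DIRECTED_EDGES (pvMulti (pvA_indeg NODES DIRECTED_EDGES)))
    congr 1
    refine PySem.List.foldl_congr_mem _ _ _ _ ?_
    intro st n _
    exact pv_outer_step _ hg st n
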